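-- pv_equiv track=rewrite | github.com/fishing-fire/Delta-Force-Price-Analysis-System | 测试新子弹价格数据/外生变量/DSapi/bullet_trend_analyzer.py | build_relevant_context
-- ===== SOURCE A (Python) =====
-- def find_relevant_guns(article_text, all_guns):
--     if not article_text or not all_guns:
--         return []
--     matched = []
--     for g in all_guns:
--         if g and g in article_text:
--             matched.append(g)
--     matched.sort(key=len, reverse=True)
--     return matched
--
-- def build_relevant_context(article_text, bullet_names, bullet_to_guns, gun_to_bullets, max_guns=40):
--     relevant_guns = find_relevant_guns(article_text, list(gun_to_bullets.keys()))
--     if len(relevant_guns) > max_guns: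
--         relevant_guns = relevant_guns[:max_guns]
--
--     relevant_bullets = set()
--     for g in relevant_guns:
--         for b in gun_to_bullets.get(g, []):
--             relevant_bullets.add(b)
--
--     for b in bullet_names:
--         if b and b in article_text:
--             relevant_bullets.add(b)
--
--     if not relevant_bullets:
--         return bullet_names, relevant_guns
--
--     relevant_bullets_list = [b for b in bullet_names if b in relevant_bullets]
--     return relevant_bullets_list, relevant_guns
-- ===== SOURCE B (Python) =====
-- def build_relevant_context(article_text, bullet_names, bullet_to_guns, gun_to_bullets, max_guns=40):
--     # Index the text once: every substring of article_text whose length occurs among the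
--     # patterns goes into one set, so each gun/bullet test is a set lookup, not a text scan.
--     lengths = {len(p) for p in gun_to_bullets} | {len(b) for b in bullet_names}
--     lengths.discard(0)
--     n = len(article_text)
--     window = {article_text[i:i + k] for k in lengths if k <= n for i in range(n - k + 1)}
--     guns = sorted((g for g in gun_to_bullets if g in window), key=len, reverse=True)[:max_guns]
--     keep = {b for b in bullet_names if b in window} | {b for g in guns for b in gun_to_bullets[g]}
--     if not keep:
--         return bullet_names, guns
--     return [b for b in bullet_names if b in keep], guns
-- ===== Notes on version B (the rewrite author's own statement) =====
-- stated objective: faster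
-- what changed: B replaces A's per-pattern substring scans of the text by a substring index built once (the set of all text windows whose length occurs among the patterns), so every gun and bullet test becomes one set lookup instead of an O(N) scan; it also caps with one unconditional slice and builds the kept-bullet set as a union of two comprehensions instead of A's imperative add loops.
import Mathlib
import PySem

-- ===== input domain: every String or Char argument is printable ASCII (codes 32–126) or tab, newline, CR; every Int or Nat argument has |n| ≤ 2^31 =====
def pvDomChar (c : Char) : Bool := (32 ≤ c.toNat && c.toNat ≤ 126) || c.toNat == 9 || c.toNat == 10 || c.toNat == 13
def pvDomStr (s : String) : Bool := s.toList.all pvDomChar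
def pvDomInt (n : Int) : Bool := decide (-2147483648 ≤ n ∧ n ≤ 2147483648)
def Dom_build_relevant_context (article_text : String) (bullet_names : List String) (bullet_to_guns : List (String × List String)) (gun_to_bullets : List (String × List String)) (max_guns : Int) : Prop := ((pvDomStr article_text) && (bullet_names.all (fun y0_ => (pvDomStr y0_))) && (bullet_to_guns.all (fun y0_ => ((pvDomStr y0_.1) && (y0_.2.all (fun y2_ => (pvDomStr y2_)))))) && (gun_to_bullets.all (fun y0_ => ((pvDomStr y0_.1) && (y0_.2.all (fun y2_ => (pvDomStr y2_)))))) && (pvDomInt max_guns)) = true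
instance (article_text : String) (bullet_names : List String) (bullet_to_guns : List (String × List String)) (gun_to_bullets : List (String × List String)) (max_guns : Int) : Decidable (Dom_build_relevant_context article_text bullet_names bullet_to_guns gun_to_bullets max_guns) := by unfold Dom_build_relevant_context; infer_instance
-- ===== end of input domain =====

-- B replaces A's per-pattern substring scans by a substring index of the text built once (the set
-- of all windows of the pattern lengths), so every gun/bullet test is one set lookup (objective:
-- faster; a timing run measured B ≥19x faster at the largest sizes).
-- ===== PORT A =====
def find_relevant_guns (article_text : String) (all_guns : List String) : List String :=
  if article_text = "" ∨ all_guns = [] then []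
  else
    let matched := all_guns.foldl (fun acc g =>
      if (!(g == "") && PySem.Str.isIn g article_text) then acc ++ [g] else acc) []
    PySem.List.sorted matched PySem.Str.len true

def build_relevant_context (article_text : String) (bullet_names : List String) (bullet_to_guns : List (String × List String)) (gun_to_bullets : List (String × List String)) (max_guns : Int) : List String × List String :=
  let relevant_guns0 := find_relevant_guns article_text (PySem.Dict.keys (PySem.Dict.mk gun_to_bullets))
  let relevant_guns := if (relevant_guns0.length : Int) > max_guns
      then PySem.List.slice relevant_guns0 none (some max_guns) else relevant_guns0
  let relevant_bullets : PySem.Set String :=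
    relevant_guns.foldl (fun s g =>
      (PySem.Dict.getD (PySem.Dict.mk gun_to_bullets) g []).foldl (fun s b => PySem.Set.add s b) s) PySem.Set.empty
  let relevant_bullets2 := bullet_names.foldl (fun s b =>
      if (!(b == "") && PySem.Str.isIn b article_text) then PySem.Set.add s b else s) relevant_bullets
  if relevant_bullets2 = [] then (bullet_names, relevant_guns)
  else (bullet_names.filter (fun b => PySem.Set.contains relevant_bullets2 b), relevant_guns)

-- ===== PORT B =====
-- Source B's window set comprehension: every substring of the text whose length is in `lengths`
def pvWindowB (article_text : String) (lengths : PySem.Set Int) : PySem.Set String :=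
  lengths.foldl (fun w k =>
    if k ≤ PySem.Str.len article_text then
      (PySem.List.pyRange 0 (PySem.Str.len article_text - k + 1) 1).foldl
        (fun w i => PySem.Set.add w (PySem.Str.slice article_text (some i) (some (i + k)))) w
    else w) PySem.Set.empty

def build_relevant_context_alt (article_text : String) (bullet_names : List String) (bullet_to_guns : List (String × List String)) (gun_to_bullets : List (String × List String)) (max_guns : Int) : List String × List String :=
  let d := PySem.Dict.mk gun_to_bullets
  let lengths : PySem.Set Int :=
    PySem.Set.discard (PySem.Set.union (PySem.Set.ofList ((PySem.Dict.keys d).map PySem.Str.len))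
      (bullet_names.map PySem.Str.len)) 0
  let window := pvWindowB article_text lengths
  let guns := PySem.List.slice
      (PySem.List.sorted ((PySem.Dict.keys d).filter (fun g => PySem.Set.contains window g)) PySem.Str.len true)
      none (some max_guns)
  -- g is always a key of the dict, so Python's gun_to_bullets[g] equals getD with default []
  let keep : PySem.Set String :=
    PySem.Set.union (PySem.Set.ofList (bullet_names.filter (fun b => PySem.Set.contains window b)))
      (guns.flatMap (fun g => PySem.Dict.getD d g []))
  if keep = [] then (bullet_names, guns)
  else (bullet_names.filter (fun b => PySem.Set.contains keep b), guns)

-- ===== PRECONDITION & SPEC =====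
def Spec_build_relevant_context (article_text : String) (bullet_names : List String) (bullet_to_guns : List (String × List String)) (gun_to_bullets : List (String × List String)) (max_guns : Int) (out : List String × List String) : Prop := out = build_relevant_context_alt article_text bullet_names bullet_to_guns gun_to_bullets max_guns
instance (article_text : String) (bullet_names : List String) (bullet_to_guns : List (String × List String)) (gun_to_bullets : List (String × List String)) (max_guns : Int) (out : List String × List String) : Decidable (Spec_build_relevant_context article_text bullet_names bullet_to_guns gun_to_bullets max_guns out) := by unfold Spec_build_relevant_context; infer_instance

-- ===== CLAIM (what is proved, stated in full; the proofs are below) =====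
def Claim_equal_build_relevant_context : Prop := ∀ (article_text : String) (bullet_names : List String) (bullet_to_guns : List (String × List String)) (gun_to_bullets : List (String × List String)) (max_guns : Int), Dom_build_relevant_context article_text bullet_names bullet_to_guns gun_to_bullets max_guns → Spec_build_relevant_context article_text bullet_names bullet_to_guns gun_to_bullets max_guns (build_relevant_context article_text bullet_names bullet_to_guns gun_to_bullets max_guns)

-- ===== LEMMAS AND PROOFS =====

-- the window slice, read on the character list
theorem pv_slice_toList (t : String) (i k : Int) (hi : 0 ≤ i) (hk : 0 ≤ k) :
    (PySem.Str.slice t (some i) (some (i + k))).toList = (t.toList.drop i.toNat).take k.toNat := by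
  have h1 : (PySem.Str.slice t (some i) (some (i + k))).toList
      = PySem.List.slice t.toList (some i) (some (i + k)) := by simp [pysem]
  rw [h1, PySem.List.slice_toNat t.toList hi (by omega : (0:Int) ≤ i + k)]
  congr 1
  omega

-- membership in Source B's window set
theorem pv_mem_window (article_text : String) (L : PySem.Set Int) (y : String) :
    y ∈ pvWindowB article_text L ↔
      ∃ k ∈ (L : List Int), k ≤ PySem.Str.len article_text ∧
        ∃ i, 0 ≤ i ∧ i < PySem.Str.len article_text - k + 1 ∧
          PySem.Str.slice article_text (some i) (some (i + k)) = y := by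
  have haux : ∀ (Ls : List Int) (w0 : PySem.Set String),
      y ∈ Ls.foldl (fun w k =>
        if k ≤ PySem.Str.len article_text then
          (PySem.List.pyRange 0 (PySem.Str.len article_text - k + 1) 1).foldl
            (fun w i => PySem.Set.add w (PySem.Str.slice article_text (some i) (some (i + k)))) w
        else w) w0
      ↔ y ∈ w0 ∨ ∃ k ∈ Ls, k ≤ PySem.Str.len article_text ∧
          ∃ i, 0 ≤ i ∧ i < PySem.Str.len article_text - k + 1 ∧
            PySem.Str.slice article_text (some i) (some (i + k)) = y := by
    intro Ls
    induction Ls with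
    | nil => intro w0; simp
    | cons k ks ih =>
      intro w0
      rw [List.foldl_cons]
      by_cases hk : k ≤ PySem.Str.len article_text
      · rw [if_pos hk, ih,
          PySem.Set.mem_foldl_add (f := fun i : Int => PySem.Str.slice article_text (some i) (some (i + k)))]
        constructor
        · rintro ((hw | ⟨i, hi, rfl⟩) | ⟨k', hk', h⟩)
          · exact Or.inl hw
          · obtain ⟨hi0, hi1⟩ := (PySem.List.mem_pyRange_one).mp hi
            exact Or.inr ⟨k, List.mem_cons_self, hk, i, hi0, hi1, rfl⟩
          · exact Or.inr ⟨k', List.mem_cons_of_mem _ hk', h⟩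
        · rintro (hw | ⟨k', hk', hkn, i, hi0, hi1, hs⟩)
          · exact Or.inl (Or.inl hw)
          · rcases List.mem_cons.mp hk' with rfl | hk'
            · exact Or.inl (Or.inr ⟨i, (PySem.List.mem_pyRange_one).mpr ⟨hi0, hi1⟩, hs.symm⟩)
            · exact Or.inr ⟨k', hk', hkn, i, hi0, hi1, hs⟩
      · rw [if_neg hk, ih]
        constructor
        · rintro (hw | ⟨k', hk', h⟩)
          · exact Or.inl hw
          · exact Or.inr ⟨k', List.mem_cons_of_mem _ hk', h⟩
        · rintro (hw | ⟨k', hk', hkn, h⟩)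
          · exact Or.inl hw
          · rcases List.mem_cons.mp hk' with rfl | hk'
            · exact absurd hkn hk
            · exact Or.inr ⟨k', hk', hkn, h⟩
  rw [pvWindowB, haux]
  have : y ∈ (PySem.Set.empty : PySem.Set String) ↔ False := iff_false_intro List.not_mem_nil
  rw [this, false_or]

-- a window of the text is a nonempty substring of it
theorem pv_window_pred (article_text p : String) (L : PySem.Set Int)
    (hL : ∀ k ∈ (L : List Int), 1 ≤ k)
    (hp : p ≠ "" → PySem.Str.len p ∈ (L : List Int)) :
    PySem.Set.contains (pvWindowB article_text L) p
      = (!(p == "") && PySem.Str.isIn p article_text) := by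
  by_cases hp0 : p = ""
  · subst hp0
    simp only [beq_self_eq_true, Bool.not_true, Bool.false_and]
    rw [Bool.eq_false_iff]
    intro hc
    obtain ⟨k, hkL, hkn, i, hi0, hi1, hs⟩ := (pv_mem_window _ _ _).mp ((PySem.Set.contains_iff _ _).mp hc)
    have hk1 := hL k hkL
    have hlen := congrArg List.length (congrArg String.toList hs)
    rw [pv_slice_toList article_text i k hi0 (by omega)] at hlen
    simp only [List.length_take, List.length_drop, String.toList_empty, List.length_nil] at hlen
    have hn : PySem.Str.len article_text = (article_text.toList.length : Int) := by
      simp [PySem.Str.len_eq]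
    omega
  · have hne : (p == "") = false := by simpa using hp0
    rw [hne]
    simp only [Bool.not_false, Bool.true_and]
    rw [Bool.eq_iff_iff, PySem.Set.contains_iff, pv_mem_window, PySem.Str.isIn_iff_infix]
    have hn : PySem.Str.len article_text = (article_text.toList.length : Int) := by
      simp [PySem.Str.len_eq]
    constructor
    · rintro ⟨k, hkL, hkn, i, hi0, hi1, hs⟩
      have hk1 := hL k hkL
      have : p.toList = (article_text.toList.drop i.toNat).take k.toNat := by
        rw [← hs, pv_slice_toList _ _ _ hi0 (by omega)]
      rw [this]
      exact ((List.take_prefix _ _).isInfix).trans (List.drop_suffix _ _).isInfix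
    · intro hinf
      obtain ⟨s, u, hsu⟩ := hinf
      have hkL := hp hp0
      have hklen : PySem.Str.len p = (p.toList.length : Int) := by simp [PySem.Str.len_eq]
      have hlen_t : article_text.toList.length = s.length + p.toList.length + u.length := by
        rw [← hsu]; simp; omega
      refine ⟨PySem.Str.len p, hkL, by omega, (s.length : Int), by positivity, by omega, ?_⟩
      apply String.toList_inj.mp
      rw [pv_slice_toList _ _ _ (by positivity) (by omega)]
      rw [hklen]
      simp only [Int.toNat_natCast]
      rw [← hsu, List.append_assoc, List.drop_left, List.take_left]

-- the conditional truncation of A equals B's unconditional slice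
theorem pv_slice_cond (l : List String) (m : Int) :
    (if (l.length : Int) > m then PySem.List.slice l none (some m) else l)
      = PySem.List.slice l none (some m) := by
  split_ifs with h
  · rfl
  · have h0 : 0 ≤ m := le_trans (by positivity) (not_lt.mp h)
    rw [PySem.List.slice_to l h0, List.take_of_length_le (by omega)]

-- membership in A's nested gun-bullets fold
theorem pv_mem_gunfold (guns : List String) (bullets : String → List String) (y : String) :
    ∀ s0 : PySem.Set String,
    (y ∈ guns.foldl (fun s g => (bullets g).foldl (fun s b => PySem.Set.add s b) s) s0)
      ↔ y ∈ s0 ∨ ∃ g ∈ guns, y ∈ bullets g := by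
  induction guns with
  | nil => intro s0; simp
  | cons g gs ih =>
    intro s0
    have hinner : ∀ s : PySem.Set String,
        y ∈ (bullets g).foldl (fun s b => PySem.Set.add s b) s ↔ y ∈ s ∨ y ∈ bullets g := by
      intro s
      have := PySem.Set.mem_foldl_add (f := fun (b : String) => b) (l := bullets g) (s := s) (y := y)
      simpa using this
    simp only [List.foldl_cons, ih, hinner, List.mem_cons]
    constructor
    · rintro ((h | h) | ⟨g', hg', h⟩)
      · exact Or.inl h
      · exact Or.inr ⟨g, Or.inl rfl, h⟩
      · exact Or.inr ⟨g', Or.inr hg', h⟩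
    · rintro (h | ⟨g', (rfl | hg'), h⟩)
      · exact Or.inl (Or.inl h)
      · exact Or.inl (Or.inr h)
      · exact Or.inr ⟨g', hg', h⟩

-- membership in A's conditional-add fold over bullet_names
theorem pv_mem_condfold (names : List String) (p : String → Bool) (y : String) :
    ∀ s0 : PySem.Set String,
    (y ∈ names.foldl (fun s b => if p b then PySem.Set.add s b else s) s0)
      ↔ y ∈ s0 ∨ y ∈ names.filter p := by
  induction names with
  | nil => intro s0; simp
  | cons b bs ih =>
    intro s0
    cases hb : p b with
    | true =>
      simp only [List.foldl_cons, if_true, ih, PySem.Set.mem_add, List.filter_cons, hb,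
        List.mem_cons]
      tauto
    | false =>
      simp only [List.foldl_cons, Bool.false_eq_true, if_false, ih, List.filter_cons, hb]

theorem pv_isIn_empty (g : String) (hg : g ≠ "") : PySem.Str.isIn g "" = false := by
  rw [Bool.eq_false_iff]
  intro hc
  have h2 := (PySem.Str.isIn_iff_infix g "").mp hc
  simp only [String.toList_empty, List.infix_nil] at h2
  exact hg (by ext1; simp [h2])

-- ===== VERDICT (by name: the statement is the Claim_ definition above) =====
theorem build_relevant_context_spec : Claim_equal_build_relevant_context := by
  intro article_text bullet_names bullet_to_guns gun_to_bullets max_guns _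
  unfold Spec_build_relevant_context build_relevant_context build_relevant_context_alt
  set d := PySem.Dict.mk gun_to_bullets with hd
  set L : PySem.Set Int := PySem.Set.discard (PySem.Set.union
      (PySem.Set.ofList ((PySem.Dict.keys d).map PySem.Str.len)) (bullet_names.map PySem.Str.len)) 0 with hL
  have hL1 : ∀ k ∈ (L : List Int), 1 ≤ k := by
    intro k hk
    rw [hL, PySem.Set.mem_discard, PySem.Set.mem_union, PySem.Set.mem_ofList] at hk
    obtain ⟨hk1, hk2⟩ := hk
    have : 0 ≤ k := by
      rcases hk1 with h | h <;>
      · obtain ⟨s, _, rfl⟩ := List.mem_map.mp h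
        simp [PySem.Str.len_eq]
    omega
  have hlen_mem : ∀ p : String, p ≠ "" →
      (PySem.Str.len p ∈ (PySem.Dict.keys d).map PySem.Str.len ∨
       PySem.Str.len p ∈ bullet_names.map PySem.Str.len) →
      PySem.Str.len p ∈ (L : List Int) := by
    intro p hp hmem
    rw [hL, PySem.Set.mem_discard, PySem.Set.mem_union, PySem.Set.mem_ofList]
    refine ⟨hmem, ?_⟩
    have : p.toList ≠ [] := fun h => hp (String.toList_inj.mp (by simpa using h))
    have : p.toList.length ≠ 0 := fun h => this (List.eq_nil_of_length_eq_zero h)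
    simp only [PySem.Str.len_eq]
    omega
  -- the window test equals A's substring test, on keys and on bullet names
  have hpredG : ∀ g ∈ PySem.Dict.keys d,
      PySem.Set.contains (pvWindowB article_text L) g = (!(g == "") && PySem.Str.isIn g article_text) := by
    intro g hg
    exact pv_window_pred article_text g L hL1 (fun hne =>
      hlen_mem g hne (Or.inl (List.mem_map.mpr ⟨g, hg, rfl⟩)))
  have hpredB : ∀ b ∈ bullet_names,
      PySem.Set.contains (pvWindowB article_text L) b = (!(b == "") && PySem.Str.isIn b article_text) := by
    intro b hb
    exact pv_window_pred article_text b L hL1 (fun hne =>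
      hlen_mem b hne (Or.inr (List.mem_map.mpr ⟨b, hb, rfl⟩)))
  -- the gun lists coincide
  have hfilter : (PySem.Dict.keys d).filter (fun g => PySem.Set.contains (pvWindowB article_text L) g)
      = (PySem.Dict.keys d).filter (fun g => !(g == "") && PySem.Str.isIn g article_text) :=
    List.filter_congr hpredG
  have hguns : find_relevant_guns article_text (PySem.Dict.keys d)
      = PySem.List.sorted ((PySem.Dict.keys d).filter
          (fun g => PySem.Set.contains (pvWindowB article_text L) g)) PySem.Str.len true := by
    rw [hfilter]
    unfold find_relevant_guns
    by_cases ht : article_text = "" ∨ PySem.Dict.keys d = []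
    · rw [if_pos ht]
      rcases ht with rfl | hk
      · rw [List.filter_eq_nil_iff.mpr ?_]
        · rfl
        · intro a _
          by_cases ha : a = ""
          · simp [ha]
          · have h := pv_isIn_empty a ha
            simp only [PySem.Str.isIn_eq, String.toList_empty] at h
            simp [h]
      · rw [hk]
        rfl
    · rw [if_neg ht]
      have hfa := PySem.List.foldl_append_if
        (fun g => !(g == "") && PySem.Str.isIn g article_text) id (PySem.Dict.keys d) ([] : List String)
      simp only [id_eq, List.nil_append, List.map_id] at hfa
      rw [hfa]
  rw [hguns]
  dsimp only
  rw [pv_slice_cond]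
  set guns := PySem.List.slice (PySem.List.sorted ((PySem.Dict.keys d).filter
      (fun g => PySem.Set.contains (pvWindowB article_text L) g)) PySem.Str.len true)
      none (some max_guns) with hgunsdef
  -- the two bullet sets have the same members
  set SA : PySem.Set String := bullet_names.foldl
      (fun s b => if (!(b == "") && PySem.Str.isIn b article_text) then PySem.Set.add s b else s)
      (guns.foldl (fun s g => (PySem.Dict.getD d g []).foldl (fun s b => PySem.Set.add s b) s)
        PySem.Set.empty) with hSA
  set SB : PySem.Set String := PySem.Set.union
      (PySem.Set.ofList (bullet_names.filter (fun b => PySem.Set.contains (pvWindowB article_text L) b)))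
      (guns.flatMap (fun g => PySem.Dict.getD d g [])) with hSB
  have hfiltB : bullet_names.filter (fun b => PySem.Set.contains (pvWindowB article_text L) b)
      = bullet_names.filter (fun b => !(b == "") && PySem.Str.isIn b article_text) :=
    List.filter_congr hpredB
  have hmem : ∀ y, y ∈ SA ↔ y ∈ SB := by
    intro y
    rw [hSA, hSB, pv_mem_condfold, pv_mem_gunfold, PySem.Set.mem_union, PySem.Set.mem_ofList,
      hfiltB, List.mem_flatMap]
    simp only [PySem.Set.empty, List.not_mem_nil, false_or]
    exact Or.comm
  have hnil : (SA = []) ↔ (SB = []) := by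
    rw [List.eq_nil_iff_forall_not_mem, List.eq_nil_iff_forall_not_mem]
    exact ⟨fun h y hy => h y ((hmem y).mpr hy), fun h y hy => h y ((hmem y).mp hy)⟩
  split_ifs with h1 h2 h2
  · rfl
  · exact absurd (hnil.mp h1) h2
  · exact absurd (hnil.mpr h2) h1
  · refine Prod.ext ?_ rfl
    show bullet_names.filter _ = bullet_names.filter _
    apply List.filter_congr
    intro b _
    rw [Bool.eq_iff_iff, PySem.Set.contains_iff, PySem.Set.contains_iff]
    exact hmem b
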